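-- pv_equiv track=rewrite | github.com/JinwooBaek00/Numerical-Fragility-in-Transformers | e3_attribution/src/run_e3_attribution.py | _group_layer_rows
-- ===== SOURCE A (Python) =====
-- from typing import Any
--
-- def _safe_int(value: Any, default: int = 0) -> int:
--     try:
--         return int(value)
--     except (TypeError, ValueError):
--         return default
--
-- def _group_layer_rows(per_layer_rows: list[dict[str, str]]) -> dict[int, list[dict[str, str]]]:
--     grouped: dict[int, list[dict[str, str]]] = {}
--     for row in per_layer_rows:
--         step = _safe_int(row.get("step"))
--         grouped.setdefault(step, []).append(row)
--     for rows in grouped.values():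
--         rows.sort(key=lambda item: _safe_int(item.get("layer")))
--     return grouped
-- ===== SOURCE B (Python) =====
-- def _safe_int(value, default: int = 0) -> int:
--     try:
--         return int(value)
--     except (TypeError, ValueError):
--         return default
--
--
-- def _group_layer_rows(per_layer_rows: list[dict[str, str]]) -> dict[int, list[dict[str, str]]]:
--     steps = list(dict.fromkeys(_safe_int(r.get("step")) for r in per_layer_rows))
--     return {
--         s: sorted(
--             (r for r in per_layer_rows if _safe_int(r.get("step")) == s),
--             key=lambda r: _safe_int(r.get("layer")),
--         )
--         for s in steps
--     }
-- ===== Notes on version B (the rewrite author's own statement) =====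
-- stated objective: simpler
-- what changed: Replaces the mutating dict-accumulation (setdefault/append then in-place sort of each bucket) by a dedup pass over the step keys followed by a dict comprehension that filters and sorts each group directly.
import Mathlib
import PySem

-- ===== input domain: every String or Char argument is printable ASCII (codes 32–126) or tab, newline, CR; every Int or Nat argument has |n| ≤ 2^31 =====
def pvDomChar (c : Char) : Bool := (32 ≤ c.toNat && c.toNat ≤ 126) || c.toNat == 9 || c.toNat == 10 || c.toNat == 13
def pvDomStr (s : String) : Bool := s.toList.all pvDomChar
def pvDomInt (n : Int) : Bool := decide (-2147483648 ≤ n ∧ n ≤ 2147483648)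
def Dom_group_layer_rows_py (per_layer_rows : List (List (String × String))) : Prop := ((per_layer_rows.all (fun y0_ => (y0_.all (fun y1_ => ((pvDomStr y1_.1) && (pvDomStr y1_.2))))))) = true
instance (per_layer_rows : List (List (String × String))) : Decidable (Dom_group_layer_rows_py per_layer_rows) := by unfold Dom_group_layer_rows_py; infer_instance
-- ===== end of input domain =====

-- shared helper: _safe_int(row.get(k)) — None -> TypeError -> 0, non-int string -> ValueError -> 0
def safeIntGet (row : List (String × String)) (k : String) : Int :=
  match (PySem.Dict.mk row).get? k with
  | none => 0
  | some s => (PySem.Int.ofStr? s).getD 0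

-- ===== PORT A =====
-- dict accumulation: grouped.setdefault(step, []).append(row) is grouped[step] = grouped.get(step, []) + [row];
-- the second loop sorts each bucket in place, rendered as a map over the items.
def group_layer_rows_py (per_layer_rows : List (List (String × String))) : List (Int × List (List (String × String))) :=
  let grouped : PySem.Dict Int (List (List (String × String))) :=
    per_layer_rows.foldl (fun d row => d.modify (safeIntGet row "step") [] (· ++ [row])) PySem.Dict.empty
  grouped.items.map (fun p => (p.1, PySem.List.sorted p.2 (fun item => safeIntGet item "layer") false))

-- ===== PORT B =====
-- dedup of the step keys (dict.fromkeys), then a comprehension filtering and sorting each group.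
def group_layer_rows_py_alt (per_layer_rows : List (List (String × String))) : List (Int × List (List (String × String))) :=
  let steps := PySem.List.dedup (per_layer_rows.map (fun r => safeIntGet r "step"))
  steps.map (fun s =>
    (s, PySem.List.sorted (per_layer_rows.filter (fun r => safeIntGet r "step" == s))
          (fun r => safeIntGet r "layer") false))

-- ===== PRECONDITION & SPEC =====
def Spec_group_layer_rows_py (per_layer_rows : List (List (String × String))) (out : List (Int × List (List (String × String)))) : Prop := out = group_layer_rows_py_alt per_layer_rows
instance (per_layer_rows : List (List (String × String))) (out : List (Int × List (List (String × String)))) : Decidable (Spec_group_layer_rows_py per_layer_rows out) := by unfold Spec_group_layer_rows_py; infer_instance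

-- ===== CLAIM (what is proved, stated in full; the proofs are below) =====
def Claim_equal_group_layer_rows_py : Prop := ∀ (per_layer_rows : List (List (String × String))), Dom_group_layer_rows_py per_layer_rows → Spec_group_layer_rows_py per_layer_rows (group_layer_rows_py per_layer_rows)

-- ===== LEMMAS AND PROOFS =====

-- the accumulation dict of port A: each bucket is the filter of the input by that step key
theorem groupDict_getD (rows : List (List (String × String))) (c : Int) :
    (rows.foldl (fun d row => d.modify (safeIntGet row "step") ([] : List (List (String × String))) (· ++ [row])) PySem.Dict.empty).getD c []
    = rows.filter (fun r => safeIntGet r "step" == c) := by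
  have h : rows.foldl (fun d row => d.modify (safeIntGet row "step") ([] : List (List (String × String))) (· ++ [row])) PySem.Dict.empty
      = (rows.map (fun r => (safeIntGet r "step", r))).foldl (fun d p => d.modify p.1 [] (· ++ [p.2])) PySem.Dict.empty := by
    rw [List.foldl_map]
  rw [h, PySem.Dict.getD_foldl_modify_append]
  simp [List.filter_map, Function.comp_def]

-- its keys are exactly the distinct step keys in first-appearance order (port B's dedup)
theorem groupDict_keys (rows : List (List (String × String))) :
    (rows.foldl (fun d row => d.modify (safeIntGet row "step") ([] : List (List (String × String))) (· ++ [row])) PySem.Dict.empty).keys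
    = PySem.List.dedup (rows.map (fun r => safeIntGet r "step")) := by
  rw [PySem.Dict.keys_foldl_modify_key]
  simp [PySem.List.dedup_eq_ofList, PySem.Set.update, PySem.Set.ofList_eq_foldl]

theorem groupDict_nodup_keys (rows : List (List (String × String))) :
    (rows.foldl (fun d row => d.modify (safeIntGet row "step") ([] : List (List (String × String))) (· ++ [row])) PySem.Dict.empty).keys.Nodup :=
  PySem.Dict.nodup_keys_foldl_modify_key rows (fun r => safeIntGet r "step") [] (fun _ x => (· ++ [x])) _ PySem.Dict.nodup_keys_empty

-- ===== VERDICT (by name: the statement is the Claim_ definition above) =====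
theorem group_layer_rows_py_spec : Claim_equal_group_layer_rows_py := by
  intro rows _
  unfold Spec_group_layer_rows_py group_layer_rows_py group_layer_rows_py_alt
  dsimp only
  rw [PySem.Dict.items_eq_map_keys _ (groupDict_nodup_keys rows) [], groupDict_keys, List.map_map]
  refine List.map_congr_left (fun k _ => ?_)
  simp [groupDict_getD]
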